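-- pv_equiv track=rewrite | github.com/raihanhd12/telegram-bot-tebak | src/app/services/game/service.py | _mask_token
-- ===== SOURCE A (Python) =====
-- def _mask_token(token: str) -> str:
--     """Mask a token while preserving non-alphanumeric chars."""
--     chars = list(token)
--     alnum_indexes = [idx for idx, ch in enumerate(chars) if ch.isalnum()]
--
--     if not alnum_indexes:
--         return token
--
--     if len(alnum_indexes) == 1:
--         chars[alnum_indexes[0]] = chars[alnum_indexes[0]].upper()
--         return "".join(chars)
--
--     if len(alnum_indexes) == 2:
--         first, second = alnum_indexes
--         chars[first] = chars[first].upper()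
--         chars[second] = "*"
--         return "".join(chars)
--
--     first, last = alnum_indexes[0], alnum_indexes[-1]
--     chars[first] = chars[first].upper()
--     chars[last] = chars[last].upper()
--     for idx in alnum_indexes[1:-1]:
--         chars[idx] = "*"
--
--     return "".join(chars)
-- ===== SOURCE B (Python) =====
-- def _mask_token(token: str) -> str:
--     """Mask a token while preserving non-alphanumeric chars."""
--     first = last = None
--     count = 0
--     for i, c in enumerate(token):
--         if c.isalnum():
--             if first is None:
--                 first = i
--             last = i
--             count += 1
--     if count == 0:
--         return token
--     out = []
--     for i, c in enumerate(token):
--         if not c.isalnum():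
--             out.append(c)
--         elif i == first:
--             out.append(c.upper())
--         elif i == last and count > 2:
--             out.append(c.upper())
--         else:
--             out.append("*")
--     return "".join(out)
-- ===== Notes on version B (the rewrite author's own statement) =====
-- stated objective: simpler
-- what changed: Replaces the four count-based cases with in-place list mutation and a middle-slice loop by one scan computing first/last/count of alnum positions plus a single classification pass that builds the output.
import Mathlib
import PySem

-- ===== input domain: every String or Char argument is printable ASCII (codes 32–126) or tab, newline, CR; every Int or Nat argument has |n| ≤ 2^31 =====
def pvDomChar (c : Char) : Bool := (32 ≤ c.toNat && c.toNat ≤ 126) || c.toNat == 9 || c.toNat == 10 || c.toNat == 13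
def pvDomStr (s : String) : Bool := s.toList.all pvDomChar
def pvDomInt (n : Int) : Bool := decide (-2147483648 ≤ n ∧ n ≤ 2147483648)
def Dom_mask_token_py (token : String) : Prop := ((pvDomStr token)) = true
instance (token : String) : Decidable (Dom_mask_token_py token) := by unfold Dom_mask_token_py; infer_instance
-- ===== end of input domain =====

-- B replaces A's four count-based cases with in-place mutation by one first/last/count scan
-- plus a single classification pass (objective: simpler; return value only, no mutation observable).

-- ===== PORT A =====
-- alnum_indexes = [idx for idx, ch in enumerate(chars) if ch.isalnum()]
def pvAlnumIdx (cs : List Char) : List Int :=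
  (PySem.List.enumerate cs 0).filterMap (fun p => if PySem.Chars.isalnum p.2 then some p.1 else none)

def mask_token_py (token : String) : String :=
  let chars := token.toList
  let idxs := pvAlnumIdx chars
  match idxs with
  | [] => token
  | [i] =>
      String.ofList (chars.set i.toNat (PySem.Chars.upperChar (chars.getD i.toNat ' ')))
  | [i, j] =>
      String.ofList ((chars.set i.toNat (PySem.Chars.upperChar (chars.getD i.toNat ' '))).set j.toNat '*')
  | i :: rest =>
      let l := (i :: rest).getLast (by simp)
      let c1 := chars.set i.toNat (PySem.Chars.upperChar (chars.getD i.toNat ' '))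
      let c2 := c1.set l.toNat (PySem.Chars.upperChar (c1.getD l.toNat ' '))
      String.ofList ((PySem.List.slice (i :: rest) (some 1) (some (-1))).foldl
        (fun a k => a.set k.toNat '*') c2)

-- ===== PORT B =====
def mask_token_py_alt (token : String) : String :=
  let st := (PySem.List.enumerate token.toList 0).foldl
      (fun (st : Option Int × Option Int × Int) p =>
        if PySem.Chars.isalnum p.2 then
          ((match st.1 with | none => some p.1 | some f => some f), some p.1, st.2.2 + 1)
        else st)
      (none, none, 0)
  if st.2.2 == 0 then token
  else
    String.ofList ((PySem.List.enumerate token.toList 0).map (fun p =>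
      if ¬ PySem.Chars.isalnum p.2 then p.2
      else if st.1 == some p.1 then PySem.Chars.upperChar p.2
      else if st.2.1 == some p.1 && decide (st.2.2 > 2) then PySem.Chars.upperChar p.2
      else '*'))

-- ===== PRECONDITION & SPEC =====
def Spec_mask_token_py (token : String) (out : String) : Prop := out = mask_token_py_alt token
instance (token : String) (out : String) : Decidable (Spec_mask_token_py token out) := by unfold Spec_mask_token_py; infer_instance

-- ===== CLAIM (what is proved, stated in full; the proofs are below) =====
def Claim_equal_mask_token_py : Prop := ∀ (token : String), Dom_mask_token_py token → Spec_mask_token_py token (mask_token_py token)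

-- ===== LEMMAS AND PROOFS =====

theorem mask_idx_mem (cs : List Char) (j : Int) :
    j ∈ pvAlnumIdx cs ↔ ∃ (k : Nat) (h : k < cs.length), j = (k : Int) ∧ PySem.Chars.isalnum cs[k] = true := by
  unfold pvAlnumIdx
  simp only [List.mem_filterMap, PySem.List.mem_enumerate_iff]
  constructor
  · rintro ⟨p, ⟨k, hk, rfl⟩, hp⟩
    split at hp
    · exact ⟨k, hk, by simpa using hp.symm, by assumption⟩
    · simp at hp
  · rintro ⟨k, hk, rfl, ha⟩
    exact ⟨((k : Int), cs[k]), ⟨k, hk, by simp⟩, by simp [ha]⟩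

theorem mask_idx_pairwise (cs : List Char) : (pvAlnumIdx cs).Pairwise (· < ·) := by
  unfold pvAlnumIdx
  refine List.Pairwise.filterMap _ ?_ (PySem.List.pairwise_lt_enumerate cs 0)
  intro a b hab x hx y hy
  split at hx <;> split at hy <;> simp_all

theorem mask_scan (xs : List (Int × Char)) (f0 l0 : Option Int) (c0 : Int) :
    xs.foldl (fun (st : Option Int × Option Int × Int) p =>
        if PySem.Chars.isalnum p.2 then
          ((match st.1 with | none => some p.1 | some f => some f), some p.1, st.2.2 + 1)
        else st) (f0, l0, c0)
    = (f0.or (xs.filterMap (fun p => if PySem.Chars.isalnum p.2 then some p.1 else none)).head?,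
       ((xs.filterMap (fun p => if PySem.Chars.isalnum p.2 then some p.1 else none)).getLast?).or l0,
       c0 + (xs.filterMap (fun p => if PySem.Chars.isalnum p.2 then some p.1 else none)).length) := by
  induction xs generalizing f0 l0 c0 with
  | nil => simp
  | cons p xs ih =>
    by_cases hp : PySem.Chars.isalnum p.2
    · have hm : (match f0 with | none => some p.1 | some f => some f) = f0.or (some p.1) := by
        cases f0 <;> rfl
    -- head/getLast/length bookkeeping
      simp only [List.foldl_cons, hp, if_pos, hm, ih, List.filterMap_cons, if_pos hp]
      refine Prod.ext ?_ (Prod.ext ?_ ?_)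
      · simp [Option.or_assoc]
      · cases hys : (xs.filterMap (fun p => if PySem.Chars.isalnum p.2 then some p.1 else none)) with
        | nil => simp
        | cons y ys =>
            have h := List.getLast?_eq_some_getLast (l := y :: ys) (by simp)
            simp [List.getLast?_cons_cons, h]
      · simp; push_cast; ring
    · simp only [List.foldl_cons, hp, if_neg, ih, List.filterMap_cons, if_neg hp]
      simp [hp]

theorem getElem?_foldl_set (ms : List Int) (a : List Char) (k : Nat) :
    (ms.foldl (fun b j => b.set j.toNat '*') a)[k]? =
      if k < a.length ∧ ∃ j ∈ ms, j.toNat = k then some '*' else a[k]? := by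
  induction ms generalizing a with
  | nil => simp
  | cons j0 ms ih =>
    have hcons : (∃ j ∈ j0 :: ms, j.toNat = k) ↔ (j0.toNat = k ∨ ∃ j ∈ ms, j.toNat = k) := by
      simp [List.mem_cons, or_and_right, exists_or]
    simp only [List.foldl_cons, ih, List.length_set, List.getElem?_set, hcons]
    by_cases hk : k < a.length <;> by_cases hex : ∃ j ∈ ms, j.toNat = k <;>
      by_cases hj : j0.toNat = k <;>
      simp [hk, hex, hj, List.getElem?_set, List.getElem?_eq_none_iff] <;> omega

theorem slice_one_neg_one {α : Type} (xs : List α) :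
    PySem.List.slice xs (some 1) (some (-1)) = xs.tail.dropLast := by
  cases xs with
  | nil => rfl
  | cons x xs =>
      have h1 : PySem.List.clampIdx (x::xs).length 1 = 1 := by
        simp [PySem.List.clampIdx]
      have h2 : PySem.List.clampIdx (x::xs).length (-1) = xs.length := by
        simp [PySem.List.clampIdx]
      simp [PySem.List.slice, h1, h2, List.dropLast_eq_take]

theorem pvAlnumIdx_fold (cs : List Char) :
    (PySem.List.enumerate cs 0).filterMap (fun p => if PySem.Chars.isalnum p.2 then some p.1 else none) = pvAlnumIdx cs := rfl

theorem mapB_getElem? (cs : List Char) (f : Int × Char → Char) (k : Nat) :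
    ((PySem.List.enumerate cs 0).map f)[k]? = cs[k]?.map (fun x => f ((k : Int), x)) := by
  simp [List.getElem?_map, PySem.List.getElem?_enumerate]
  cases cs[k]? <;> simp

theorem mask_idx_mem' (cs : List Char) (j : Int) (hj : j ∈ pvAlnumIdx cs) :
    0 ≤ j ∧ ∃ h : j.toNat < cs.length, PySem.Chars.isalnum cs[j.toNat] = true := by
  obtain ⟨k, hk, rfl, ha⟩ := (mask_idx_mem cs j).mp hj
  exact ⟨Int.natCast_nonneg k, by simpa using hk, by simpa using ha⟩

theorem mask_idx_mem_of (cs : List Char) (k : Nat) (hk : k < cs.length)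
    (ha : PySem.Chars.isalnum cs[k] = true) : (k : Int) ∈ pvAlnumIdx cs :=
  (mask_idx_mem cs _).mpr ⟨k, hk, rfl, ha⟩

theorem mask_token_py_spec : Claim_equal_mask_token_py := by
  intro token _
  unfold Spec_mask_token_py mask_token_py mask_token_py_alt
  simp only [mask_scan, pvAlnumIdx_fold]
  rcases hidx : pvAlnumIdx token.toList with _ | ⟨i, rest⟩
  · simp
  · rcases rest with _ | ⟨j, rest2⟩
    · -- one alnum char
      obtain ⟨hi0, hilt, hia⟩ := mask_idx_mem' token.toList i (by rw [hidx]; simp)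
      simp only [List.head?_cons, List.length_cons, List.length_nil, Option.none_or,
        Option.or_none, List.getLast?_singleton]
      norm_num
      refine congrArg String.ofList ?_
      apply List.ext_getElem?
      intro k
      rw [mapB_getElem?, List.getElem?_set]
      by_cases hk : k < token.toList.length
      · rw [List.getElem?_eq_getElem hk]
        simp only [Option.map_some]
        by_cases ha : PySem.Chars.isalnum (token.toList[k]) = true
        · have hmem := mask_idx_mem_of _ k hk ha
          rw [hidx] at hmem
          simp only [List.mem_singleton] at hmem
          simp [← hmem, ha, List.getD_eq_getElem?_getD, List.getElem?_eq_getElem hk, hk]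
          simpa using hk
        · have hne : i.toNat ≠ k := by
            intro he
            simp only [he] at hia
            exact ha hia
          simp [hne, ha]
      · have h1 : token.toList[k]? = none := List.getElem?_eq_none (by omega)
        have hlen : token.toList.length = token.length := by simp
        simp [h1, hk]
        omega
    · rcases rest2 with _ | ⟨m, rs⟩
      · -- two alnum chars
        obtain ⟨hi0, hilt, hia⟩ := mask_idx_mem' token.toList i (by rw [hidx]; simp)
        obtain ⟨hj0, hjlt, hja⟩ := mask_idx_mem' token.toList j (by rw [hidx]; simp)
        have hij : i < j := by
          have hpw := mask_idx_pairwise token.toList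
          rw [hidx] at hpw
          exact (List.pairwise_cons.mp hpw).1 j (by simp)
        simp only [List.head?_cons, Option.none_or, Option.or_none, List.getLast?_cons_cons,
          List.getLast?_singleton, List.length_cons, List.length_nil]
        norm_num
        refine congrArg String.ofList ?_
        apply List.ext_getElem?
        intro k
        rw [mapB_getElem?, List.getElem?_set, List.getElem?_set]
        by_cases hk : k < token.toList.length
        · rw [List.getElem?_eq_getElem hk]
          simp only [Option.map_some]
          by_cases ha : PySem.Chars.isalnum (token.toList[k]) = true
          · have hmem := mask_idx_mem_of _ k hk ha
            rw [hidx] at hmem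
            simp only [List.mem_cons, List.mem_singleton, List.not_mem_nil, or_false] at hmem
            rcases hmem with hmi | hmj
            · have hne : j.toNat ≠ k := by omega
              simp [hne, ← hmi, ha, List.getD_eq_getElem?_getD, List.getElem?_eq_getElem hk, hk]
              simpa using hk
            · have hik : i ≠ (k : Int) := by omega
              have hjk : j.toNat = k := by omega
              simp [hjk, hk, ha, hik]
              simpa using hk
          · have hnei : i.toNat ≠ k := by
              intro he
              simp only [he] at hia
              exact ha hia
            have hnej : j.toNat ≠ k := by
              intro he
              simp only [he] at hja
              exact ha hja
            simp [hnei, hnej, ha]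
        · have h1 : token.toList[k]? = none := List.getElem?_eq_none (by omega)
          have hlen : token.toList.length = token.length := by simp
          simp [h1, hk]
          split_ifs <;> first | rfl | omega
      · -- three or more alnum chars
        have hpw := mask_idx_pairwise token.toList
        rw [hidx] at hpw
        obtain ⟨hi0, hilt, hia⟩ := mask_idx_mem' token.toList i (by rw [hidx]; simp)
        have hlne : (j :: m :: rs) ≠ [] := by simp
        have hlcons : (i :: j :: m :: rs).getLast (by simp) = (j :: m :: rs).getLast hlne :=
          List.getLast_cons hlne
        have hlmem : (j :: m :: rs).getLast hlne ∈ pvAlnumIdx token.toList := by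
          rw [hidx]
          exact List.mem_cons_of_mem _ (List.getLast_mem hlne)
        obtain ⟨hl0, hllt, hla⟩ := mask_idx_mem' token.toList _ hlmem
        set L := (j :: m :: rs).getLast hlne with hL
        set M := (j :: m :: rs).dropLast with hM
        have hdecomp : j :: m :: rs = M ++ [L] := (List.dropLast_concat_getLast hlne).symm
        have hslice : PySem.List.slice (i :: j :: m :: rs) (some 1) (some (-1)) = M := by
          rw [slice_one_neg_one]
          rfl
        have hi_lt : ∀ x ∈ j :: m :: rs, i < x := (List.pairwise_cons.mp hpw).1
        have htpw : (j :: m :: rs).Pairwise (· < ·) := (List.pairwise_cons.mp hpw).2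
        have hmid_lt : ∀ x ∈ M, x < L := by
          rw [hdecomp] at htpw
          intro x hx
          exact (List.pairwise_append.mp htpw).2.2 x hx _ (by simp)
        have hmid_mem : ∀ x ∈ M, x ∈ pvAlnumIdx token.toList := by
          intro x hx
          rw [hidx]
          refine List.mem_cons_of_mem _ ?_
          rw [hdecomp]
          exact List.mem_append_left _ hx
        have hil : i < L := hi_lt _ (List.getLast_mem hlne)
        have hglast : (i :: j :: m :: rs).getLast? = some L := by
          rw [List.getLast?_eq_some_getLast (l := i :: j :: m :: rs) (by simp)]
          exact congrArg some hlcons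
        clear_value L M
        simp only [← hL] at hla
        simp only [hglast, List.head?_cons, Option.none_or, Option.or_none, hslice, hlcons,
          List.length_cons]
        norm_num
        refine congrArg String.ofList ?_
        apply List.ext_getElem?
        intro k
        rw [mapB_getElem?, getElem?_foldl_set]
        simp only [List.length_set, List.getElem?_set]
        by_cases hk : k < token.toList.length
        · have hk' : k < token.length := by simpa using hk
          rw [List.getElem?_eq_getElem hk]
          simp only [Option.map_some]
          by_cases ha : PySem.Chars.isalnum (token.toList[k]) = true
          · have hmem := mask_idx_mem_of _ k hk ha
            rw [hidx] at hmem
            rw [show i :: j :: m :: rs = i :: (M ++ [L]) from by rw [← hdecomp]] at hmem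
            simp only [List.mem_cons, List.mem_append, List.mem_singleton,
              List.not_mem_nil, or_false] at hmem
            rcases hmem with h | h | h
            · -- k is the first alnum position
              have hnm : ¬ ∃ x ∈ M, x.toNat = k := by
                rintro ⟨x, hx, hxk⟩
                have hx0 := (mask_idx_mem' _ x (hmid_mem x hx)).1
                have hxi := hi_lt x (by rw [hdecomp]; exact List.mem_append_left _ hx)
                omega
              have hlk : L.toNat ≠ k := by omega
              simp [hnm, hlk, ← h, ha, List.getD_eq_getElem?_getD, List.getElem?_eq_getElem hk, hk]
              exact ⟨hk', fun hf => absurd ha (by simp only [Bool.not_eq_true]; exact hf)⟩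
            · -- k is a middle alnum position
              have hex : ∃ x ∈ M, x.toNat = k := ⟨(k : Int), h, by simp⟩
              have hik : i ≠ (k : Int) := by
                have := hi_lt _ (by rw [hdecomp]; exact List.mem_append_left _ h)
                omega
              have hlk : L ≠ (k : Int) := by
                have := hmid_lt _ h
                omega
              simp [hex, hk, hk', ha, hik, hlk]
              exact fun hf => absurd ha (by simp only [Bool.not_eq_true]; exact hf)
            · -- k is the last alnum position
              have hnm : ¬ ∃ x ∈ M, x.toNat = k := by
                rintro ⟨x, hx, hxk⟩
                have hx0 := (mask_idx_mem' _ x (hmid_mem x hx)).1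
                have := hmid_lt x hx
                omega
              have hlk : L.toNat = k := by omega
              have hlk' : L = (k : Int) := by omega
              have hik : i.toNat ≠ k := by omega
              have hik' : i ≠ (k : Int) := by omega
              have hc : (2 : Int) ≤ (rs.length : Int) + 1 + 1 := by omega
              simp [hnm, hlk, hlk', hik, hik', hc, ha, hk, List.getD_eq_getElem?_getD,
                List.getElem?_set, List.getElem?_eq_getElem hk]
              exact ⟨hk', fun hf => absurd ha (by simp only [Bool.not_eq_true]; exact hf)⟩
          · -- k is not an alnum position
            have hnm : ¬ ∃ x ∈ M, x.toNat = k := by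
              rintro ⟨x, hx, hxk⟩
              obtain ⟨hx0, hxlt, hxa⟩ := mask_idx_mem' _ x (hmid_mem x hx)
              simp only [hxk] at hxa
              exact ha hxa
            have hik : i.toNat ≠ k := by
              intro he
              simp only [he] at hia
              exact ha hia
            have hlk : L.toNat ≠ k := by
              intro he
              simp only [he] at hla
              exact ha hla
            simp [hnm, hik, hlk, ha]
            exact fun hf => absurd hf ha
        · have h1 : token.toList[k]? = none := List.getElem?_eq_none (by omega)
          have hlen : token.toList.length = token.length := by simp
          simp [h1, hk]
          split_ifs <;> first | rfl | omega
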